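-- pv_equiv track=rewrite | github.com/ZhikunWei/data_security2020 | hw2/hash/sha2/main.py | messagePad
-- ===== SOURCE A (Python) =====
-- def messagePad(message):
--     len_bits = len(message) * 4
--     k = 7
--     while True:
--         if (len_bits + 1 + k) % 512 == 448:
--             break
--         else:
--             k += 4
--
--     padmsg = message + '80'
--     for i in range((k - 7) // 4):
--         padmsg += '0'
--     padmsg += '%016X' % len_bits
--
--     return padmsg
-- ===== SOURCE B (Python) =====
-- def messagePad(message):
--     len_bits = len(message) * 4
--     r = (447 - len_bits) % 512
--     k = r if r >= 7 else r + 512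
--     return message + '80' + '0' * ((k - 7) // 4) + '%016X' % len_bits
-- ===== Notes on version B (the rewrite author's own statement) =====
-- stated objective: simpler
-- what changed: Replaces the unbounded 'k += 4' search loop and the character-appending for-loop with a closed-form modular-arithmetic expression for k and direct string repetition.
import Mathlib
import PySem

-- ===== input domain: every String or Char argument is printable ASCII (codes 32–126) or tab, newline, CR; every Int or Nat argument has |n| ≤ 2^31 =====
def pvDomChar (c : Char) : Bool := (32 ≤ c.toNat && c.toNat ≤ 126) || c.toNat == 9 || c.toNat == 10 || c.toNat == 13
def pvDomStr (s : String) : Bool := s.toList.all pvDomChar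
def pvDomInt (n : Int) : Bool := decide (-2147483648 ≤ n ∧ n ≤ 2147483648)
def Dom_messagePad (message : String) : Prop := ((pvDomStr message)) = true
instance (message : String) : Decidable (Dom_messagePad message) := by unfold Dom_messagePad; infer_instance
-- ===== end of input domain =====

-- B replaces A's upward search for the padding length k by the closed form
-- r = (447 - len_bits) % 512, k = r if r >= 7 else r + 512 (objective: simpler).


-- ===== PORT A =====
-- '%X' hex digit (uppercase); the '%016X' helper is shared by both ports (both Pythons format with '%016X').
def pvHexDigit (n : Nat) : Char := Char.ofNat (if n < 10 then 48 + n else 55 + n)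

-- repeated divmod-16 digit extraction; fuel-bounded structural recursion (fuel = n suffices: n has ≤ n hex digits)
def pvHexAux (fuel : Nat) (n : Nat) (acc : List Char) : List Char :=
  match fuel, n with
  | 0, _ => acc
  | _ + 1, 0 => acc
  | fuel + 1, m + 1 => pvHexAux fuel ((m + 1) / 16) (pvHexDigit ((m + 1) % 16) :: acc)

-- '%016X' % n for 0 ≤ n (the only case either Python reaches: n = 4*len(message))
def pvHex016 (n : Int) : List Char :=
  let ds := if n.toNat = 0 then ['0'] else pvHexAux n.toNat n.toNat []
  List.replicate (16 - ds.length) '0' ++ ds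

-- A's 'while True: ... k += 4' search. The fuel only makes the loop total: starting from
-- k = 7 with len_bits a multiple of 4 the Python loop stops within 127 steps, and fuel is 128.
def padK (fuel : Nat) (len_bits : Int) (k : Int) : Int :=
  match fuel with
  | 0 => k
  | fuel + 1 =>
    if PySem.Int.mod (len_bits + 1 + k) 512 = 448 then k
    else padK fuel len_bits (k + 4)

def messagePad (message : String) : String :=
  let len_bits : Int := PySem.Str.len message * 4
  let k := padK 128 len_bits 7
  let padmsg := message.toList ++ ['8', '0']
  let padmsg :=
    (PySem.List.pyRange 0 (PySem.Int.floordiv (k - 7) 4) 1).foldl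
      (fun acc _ => acc ++ ['0']) padmsg
  String.ofList (padmsg ++ pvHex016 len_bits)

-- ===== PORT B =====
def messagePad_alt (message : String) : String :=
  let len_bits : Int := PySem.Str.len message * 4
  let r := PySem.Int.mod (447 - len_bits) 512
  let k := if r ≥ 7 then r else r + 512
  String.ofList (message.toList ++ ['8', '0'] ++
    List.replicate (PySem.Int.floordiv (k - 7) 4).toNat '0' ++ pvHex016 len_bits)

-- ===== PRECONDITION & SPEC =====
def Spec_messagePad (message : String) (out : String) : Prop := out = messagePad_alt message
instance (message : String) (out : String) : Decidable (Spec_messagePad message out) := by unfold Spec_messagePad; infer_instance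

-- ===== CLAIM (what is proved, stated in full; the proofs are below) =====
def Claim_equal_messagePad : Prop := ∀ (message : String), Dom_messagePad message → Spec_messagePad message (messagePad message)

-- ===== LEMMAS AND PROOFS =====

-- A's search loop, in closed form (enough fuel; k ≡ 3 and len_bits ≡ 0 mod 4 as at the call site).
theorem padK_eq (fuel : Nat) (lb k : Int) (h4 : lb % 4 = 0) (hk : k % 4 = 3)
    (hle : (447 - lb - k) % 512 ≤ 4 * fuel) :
    padK fuel lb k = k + (447 - lb - k) % 512 := by
  induction fuel generalizing k with
  | zero => rw [show padK 0 lb k = k from rfl]; omega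
  | succ fuel ih =>
    rw [show padK (fuel + 1) lb k
        = (if PySem.Int.mod (lb + 1 + k) 512 = 448 then k else padK fuel lb (k + 4)) from rfl]
    rw [PySem.Int.mod_eq_emod_of_pos (by decide)]
    split_ifs with hstop
    · omega
    · rw [ih (k + 4) (by omega) (by omega)]
      omega

-- the loop at its call site: len_bits = 4*len, start k = 7, fuel 128 = 512/4 always suffices
theorem padK_call (s : String) :
    padK 128 (PySem.Str.len s * 4) 7 = 7 + (447 - PySem.Str.len s * 4 - 7) % 512 :=
  padK_eq 128 _ 7 (Int.mul_emod_left _ _) (by decide) (by omega)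

-- B's closed form for k equals A's loop result (lb = 4*len is a multiple of 4).
theorem k_closed (lb : Int) (h : lb % 4 = 0) :
    7 + (447 - lb - 7) % 512 =
      (if PySem.Int.mod (447 - lb) 512 ≥ 7 then PySem.Int.mod (447 - lb) 512
       else PySem.Int.mod (447 - lb) 512 + 512) := by
  rw [PySem.Int.mod_eq_emod_of_pos (by decide)]
  split_ifs <;> omega

-- ===== VERDICT (by name: the statement is the Claim_ definition above) =====
theorem messagePad_spec : Claim_equal_messagePad := by
  intro message _
  unfold Spec_messagePad messagePad messagePad_alt
  simp only [padK_call, PySem.List.foldl_append_singleton_eq_map (f := fun _ => '0'),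
    List.map_const', PySem.List.length_pyRange_one,
    k_closed (PySem.Str.len message * 4) (Int.mul_emod_left _ _),
    sub_zero, List.append_assoc]
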